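-- pv_equiv track=rewrite | github.com/Burugi/Algorithms | DynamicProgramming2/1309.py | min_way
-- ===== SOURCE A (Python) =====
-- MOD=9901
--
-- def min_way(n):
--     dp = [[0]*3 for _ in range(n)]
--     dp[0][0]=1
--     dp[0][1]=1
--     dp[0][2]=1
--
--     for i in range(1,n):
--         dp[i][0]=(dp[i-1][0]+dp[i-1][1]+dp[i-1][2])%MOD
--         dp[i][1]=(dp[i-1][0]+dp[i-1][2])%MOD
--         dp[i][2]=(dp[i-1][0]+dp[i-1][1])%MOD
--
--     return (dp[n-1][0]+dp[n-1][1]+dp[n-1][2])%MOD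
-- ===== SOURCE B (Python) =====
-- MOD = 9901
--
-- def min_way(n):
--     # 3x3 transition-matrix exponentiation by squaring, mod 9901.
--     def mul(A, B):
--         return [[(A[i][0] * B[0][j] + A[i][1] * B[1][j] + A[i][2] * B[2][j]) % MOD
--                  for j in range(3)] for i in range(3)]
--     R = [[1, 0, 0], [0, 1, 0], [0, 0, 1]]
--     T = [[1, 1, 1], [1, 0, 1], [1, 1, 0]]
--     e = n - 1
--     while e > 0:
--         if e & 1:
--             R = mul(R, T)
--         T = mul(T, T)
--         e >>= 1
--     return (sum(R[0]) + sum(R[1]) + sum(R[2])) % MOD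
-- ===== Notes on version B (the rewrite author's own statement) =====
-- stated objective: faster
-- what changed: Replaces the linear dp-table scan with binary exponentiation of the 3x3 transition matrix mod 9901, so the answer for n is the total of the entries of T^(n-1).
import Mathlib
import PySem

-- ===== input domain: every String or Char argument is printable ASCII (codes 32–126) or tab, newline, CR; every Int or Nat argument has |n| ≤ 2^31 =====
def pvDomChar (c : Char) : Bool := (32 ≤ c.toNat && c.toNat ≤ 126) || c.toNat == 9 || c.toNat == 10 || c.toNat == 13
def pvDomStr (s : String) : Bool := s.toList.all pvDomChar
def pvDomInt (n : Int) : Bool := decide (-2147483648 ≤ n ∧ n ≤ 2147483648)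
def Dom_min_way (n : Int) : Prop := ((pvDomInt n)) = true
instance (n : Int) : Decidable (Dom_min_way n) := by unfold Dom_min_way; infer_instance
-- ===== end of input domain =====

-- B replaces A's linear dp-table scan by binary exponentiation of the 3×3 transition
-- matrix mod 9901 (objective: faster, O(log n) vs O(n)).

-- ===== PORT A =====
-- literal transliteration of A: build the n×3 table, seed row 0, fill rows 1..n-1,
-- return the sum of the last row mod 9901.
def min_way (n : Int) : Int :=
  -- dp (a Python list of 3-element lists) is kept as an Array of rows so the port
  -- evaluates in linear time like the Python.  Every dp index A uses is nonnegative
  -- and in range whenever n ≥ 1 (Pre_), where `.toNat` + `getD`/`setIfInBounds`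
  -- agree exactly with Python list indexing/assignment.
  let dp : Array (List Int) := ((PySem.List.pyRange 0 n 1).map (fun _ => ([0,0,0] : List Int))).toArray
  let dp := dp.setIfInBounds (0:Int).toNat (PySem.List.pySetD (dp.getD (0:Int).toNat []) 0 1)
  let dp := dp.setIfInBounds (0:Int).toNat (PySem.List.pySetD (dp.getD (0:Int).toNat []) 1 1)
  let dp := dp.setIfInBounds (0:Int).toNat (PySem.List.pySetD (dp.getD (0:Int).toNat []) 2 1)
  let dp := (PySem.List.pyRange 1 n 1).foldl (fun dp i =>
    let dp := dp.setIfInBounds i.toNat (PySem.List.pySetD (dp.getD i.toNat []) 0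
      ((PySem.List.pyGetD (dp.getD (i-1).toNat []) 0 0
        + PySem.List.pyGetD (dp.getD (i-1).toNat []) 1 0
        + PySem.List.pyGetD (dp.getD (i-1).toNat []) 2 0) % 9901))
    let dp := dp.setIfInBounds i.toNat (PySem.List.pySetD (dp.getD i.toNat []) 1
      ((PySem.List.pyGetD (dp.getD (i-1).toNat []) 0 0
        + PySem.List.pyGetD (dp.getD (i-1).toNat []) 2 0) % 9901))
    let dp := dp.setIfInBounds i.toNat (PySem.List.pySetD (dp.getD i.toNat []) 2
      ((PySem.List.pyGetD (dp.getD (i-1).toNat []) 0 0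
        + PySem.List.pyGetD (dp.getD (i-1).toNat []) 1 0) % 9901))
    dp) dp
  (PySem.List.pyGetD (dp.getD (n-1).toNat []) 0 0
    + PySem.List.pyGetD (dp.getD (n-1).toNat []) 1 0
    + PySem.List.pyGetD (dp.getD (n-1).toNat []) 2 0) % 9901

-- ===== PORT B =====
-- a 3×3 integer matrix as a triple of rows (triples)
abbrev PvM3 := (Int × Int × Int) × (Int × Int × Int) × (Int × Int × Int)

-- Source B's `mul`: entrywise 3×3 product, each entry reduced mod 9901
def pvMul (A B : PvM3) : PvM3 :=
  (((A.1.1 * B.1.1 + A.1.2.1 * B.2.1.1 + A.1.2.2 * B.2.2.1) % 9901,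
    (A.1.1 * B.1.2.1 + A.1.2.1 * B.2.1.2.1 + A.1.2.2 * B.2.2.2.1) % 9901,
    (A.1.1 * B.1.2.2 + A.1.2.1 * B.2.1.2.2 + A.1.2.2 * B.2.2.2.2) % 9901),
   ((A.2.1.1 * B.1.1 + A.2.1.2.1 * B.2.1.1 + A.2.1.2.2 * B.2.2.1) % 9901,
    (A.2.1.1 * B.1.2.1 + A.2.1.2.1 * B.2.1.2.1 + A.2.1.2.2 * B.2.2.2.1) % 9901,
    (A.2.1.1 * B.1.2.2 + A.2.1.2.1 * B.2.1.2.2 + A.2.1.2.2 * B.2.2.2.2) % 9901),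
   ((A.2.2.1 * B.1.1 + A.2.2.2.1 * B.2.1.1 + A.2.2.2.2 * B.2.2.1) % 9901,
    (A.2.2.1 * B.1.2.1 + A.2.2.2.1 * B.2.1.2.1 + A.2.2.2.2 * B.2.2.2.1) % 9901,
    (A.2.2.1 * B.1.2.2 + A.2.2.2.1 * B.2.1.2.2 + A.2.2.2.2 * B.2.2.2.2) % 9901))

-- Source B's `while e > 0` square-and-multiply loop (e ≥ 0 as a Nat; `e & 1` = e % 2, `e >>= 1` = e / 2)
def pvPowLoop : Nat → PvM3 → PvM3 → PvM3
  | 0, r, _ => r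
  | e + 1, r, t =>
      pvPowLoop ((e + 1) / 2) (if (e + 1) % 2 = 1 then pvMul r t else r) (pvMul t t)
decreasing_by exact Nat.div_lt_self (Nat.succ_pos e) (by omega)

def min_way_alt (n : Int) : Int :=
  let r := pvPowLoop (n - 1).toNat ((1,0,0),(0,1,0),(0,0,1)) ((1,1,1),(1,0,1),(1,1,0))
  (r.1.1 + r.1.2.1 + r.1.2.2
   + r.2.1.1 + r.2.1.2.1 + r.2.1.2.2
   + r.2.2.1 + r.2.2.2.1 + r.2.2.2.2) % 9901

-- ===== PRECONDITION & SPEC =====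
-- Pre_ excludes n ≤ 0, where A raises IndexError (dp is empty, dp[0][0]=1 fails).
def Pre_min_way (n : Int) : Prop := 1 ≤ n
instance (n : Int) : Decidable (Pre_min_way n) := by unfold Pre_min_way; infer_instance
def pvWitness_min_way : Int := 5

def Spec_min_way (n : Int) (out : Int) : Prop := out = min_way_alt n
instance (n : Int) (out : Int) : Decidable (Spec_min_way n out) := by unfold Spec_min_way; infer_instance

-- ===== CLAIM (what is proved, stated in full; the proofs are below) =====
def Claim_equal_min_way : Prop := ∀ (n : Int), Dom_min_way n → Pre_min_way n → Spec_min_way n (min_way n)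

-- ===== LEMMAS AND PROOFS =====

def pvF : Nat → Int × Int × Int
  | 0 => (1, 1, 1)
  | k+1 =>
    (((pvF k).1 + (pvF k).2.1 + (pvF k).2.2) % 9901,
     ((pvF k).1 + (pvF k).2.2) % 9901,
     ((pvF k).1 + (pvF k).2.1) % 9901)

def pvMz (A : PvM3) : Matrix (Fin 3) (Fin 3) (ZMod 9901) :=
  !![(A.1.1 : ZMod 9901), A.1.2.1, A.1.2.2;
     A.2.1.1, A.2.1.2.1, A.2.1.2.2;
     A.2.2.1, A.2.2.2.1, A.2.2.2.2]

def pvTz : Matrix (Fin 3) (Fin 3) (ZMod 9901) := !![1,1,1;1,0,1;1,1,0]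

lemma pv_castmod (a : Int) : ((a % 9901 : Int) : ZMod 9901) = (a : ZMod 9901) := by
  have h : (9901 : ZMod 9901) = 0 := by exact_mod_cast ZMod.natCast_self 9901
  rw [Int.emod_def]
  push_cast
  rw [h]
  ring

set_option maxHeartbeats 1000000 in
lemma pv_mz_mul (A B : PvM3) : pvMz (pvMul A B) = pvMz A * pvMz B := by
  ext i j
  fin_cases i <;> fin_cases j <;>
    simp [pvMul, pvMz, Matrix.mul_apply, Fin.sum_univ_three, pv_castmod]

lemma pv_powLoop (e : Nat) : ∀ r t : PvM3, pvMz (pvPowLoop e r t) = pvMz r * (pvMz t) ^ e := by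
  induction e using Nat.strong_induction_on with
  | _ e ih =>
    intro r t
    match e with
    | 0 => simp [pvPowLoop]
    | e + 1 =>
      rw [pvPowLoop]
      rw [ih ((e+1)/2) (Nat.div_lt_self (Nat.succ_pos e) (by omega))]
      rw [pv_mz_mul]
      have hsq : (pvMz t * pvMz t) ^ ((e+1)/2) = (pvMz t) ^ (2 * ((e+1)/2)) := by
        rw [pow_mul, sq]
      by_cases hp : (e + 1) % 2 = 1
      · have he : 2 * ((e + 1) / 2) + 1 = e + 1 := by omega
        rw [if_pos hp, pv_mz_mul, hsq, mul_assoc, ← pow_succ', he]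
      · have he : 2 * ((e + 1) / 2) = e + 1 := by omega
        rw [if_neg hp, hsq, he]

lemma pv_cast_pvF (k : Nat) :
    ((pvF k).1 : ZMod 9901) = (pvTz^k) 0 0 + (pvTz^k) 0 1 + (pvTz^k) 0 2
  ∧ ((pvF k).2.1 : ZMod 9901) = (pvTz^k) 1 0 + (pvTz^k) 1 1 + (pvTz^k) 1 2
  ∧ ((pvF k).2.2 : ZMod 9901) = (pvTz^k) 2 0 + (pvTz^k) 2 1 + (pvTz^k) 2 2 := by
  induction k with
  | zero => refine ⟨?_, ?_, ?_⟩ <;> simp [pvF, Matrix.one_apply]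
  | succ k ih =>
    obtain ⟨h1, h2, h3⟩ := ih
    have hp : pvTz ^ (k+1) = pvTz * pvTz ^ k := pow_succ' pvTz k
    refine ⟨?_, ?_, ?_⟩ <;>
      · simp only [pvF, pv_castmod]
        push_cast
        simp only [h1, h2, h3, hp]
        simp [Matrix.mul_apply, Fin.sum_univ_three, pvTz]
        ring

lemma pv_mod_eq {a b : Int} (h : (a : ZMod 9901) = (b : ZMod 9901)) : a % 9901 = b % 9901 := by
  have h2 := (ZMod.intCast_eq_intCast_iff a b 9901).mp h
  exact_mod_cast h2

lemma pv_mz_I : pvMz ((1,0,0),(0,1,0),(0,0,1)) = 1 := by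
  ext i j
  fin_cases i <;> fin_cases j <;> simp [pvMz, Matrix.one_apply]

lemma pv_mz_T : pvMz ((1,1,1),(1,0,1),(1,1,0)) = pvTz := by
  ext i j
  fin_cases i <;> fin_cases j <;> simp [pvMz, pvTz]

lemma pv_key (m : Nat) :
    ((pvF m).1 + (pvF m).2.1 + (pvF m).2.2) % 9901 =
      (let r := pvPowLoop m ((1,0,0),(0,1,0),(0,0,1)) ((1,1,1),(1,0,1),(1,1,0))
       (r.1.1 + r.1.2.1 + r.1.2.2
        + r.2.1.1 + r.2.1.2.1 + r.2.1.2.2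
        + r.2.2.1 + r.2.2.2.1 + r.2.2.2.2)) % 9901 := by
  apply pv_mod_eq
  obtain ⟨h1, h2, h3⟩ := pv_cast_pvF m
  have hr : pvMz (pvPowLoop m ((1,0,0),(0,1,0),(0,0,1)) ((1,1,1),(1,0,1),(1,1,0))) = pvTz ^ m := by
    rw [pv_powLoop, pv_mz_I, pv_mz_T, one_mul]
  push_cast
  rw [h1, h2, h3]
  have hsum : ∀ X : PvM3,
      ((X.1.1 : ZMod 9901) + X.1.2.1 + X.1.2.2 + X.2.1.1 + X.2.1.2.1 + X.2.1.2.2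
        + X.2.2.1 + X.2.2.2.1 + X.2.2.2.2) =
      pvMz X 0 0 + pvMz X 0 1 + pvMz X 0 2 + pvMz X 1 0 + pvMz X 1 1 + pvMz X 1 2
        + pvMz X 2 0 + pvMz X 2 1 + pvMz X 2 2 := by
    intro X
    simp [pvMz]
  rw [hsum, hr]
  ring

-- the loop body of A's port, named for the proofs
def pvBody (dp : Array (List Int)) (i : Int) : Array (List Int) :=
  let dp := dp.setIfInBounds i.toNat (PySem.List.pySetD (dp.getD i.toNat []) 0
    ((PySem.List.pyGetD (dp.getD (i-1).toNat []) 0 0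
      + PySem.List.pyGetD (dp.getD (i-1).toNat []) 1 0
      + PySem.List.pyGetD (dp.getD (i-1).toNat []) 2 0) % 9901))
  let dp := dp.setIfInBounds i.toNat (PySem.List.pySetD (dp.getD i.toNat []) 1
    ((PySem.List.pyGetD (dp.getD (i-1).toNat []) 0 0
      + PySem.List.pyGetD (dp.getD (i-1).toNat []) 2 0) % 9901))
  let dp := dp.setIfInBounds i.toNat (PySem.List.pySetD (dp.getD i.toNat []) 2
    ((PySem.List.pyGetD (dp.getD (i-1).toNat []) 0 0
      + PySem.List.pyGetD (dp.getD (i-1).toNat []) 1 0) % 9901))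
  dp

lemma pv_body_eq (D : Array (List Int)) (k : Nat) (a b c : Int)
    (hlt : k + 1 < D.size)
    (hk : D[k]? = some [a, b, c]) (hnext : D[k+1]? = some [0, 0, 0]) :
    pvBody D (1 + (k : Int)) =
      D.setIfInBounds (k+1) [(a+b+c) % 9901, (a+c) % 9901, (a+b) % 9901] := by
  have e2 : (1 + (k:Int)).toNat = k + 1 := by omega
  have e1 : ((1 + (k:Int)) - 1).toNat = k := by omega
  have hgk : D.getD k [] = [a, b, c] := by
    rw [Array.getD_eq_getD_getElem?, hk]; rfl
  have hgk1 : D.getD (k+1) [] = [0, 0, 0] := by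
    rw [Array.getD_eq_getD_getElem?, hnext]; rfl
  have hgset : ∀ v : List Int, (D.setIfInBounds (k+1) v).getD (k+1) [] = v := by
    intro v
    rw [Array.getD_eq_getD_getElem?, Array.getElem?_setIfInBounds_self, if_pos hlt]; rfl
  have hgset' : ∀ v : List Int, (D.setIfInBounds (k+1) v).getD k [] = [a, b, c] := by
    intro v
    rw [Array.getD_eq_getD_getElem?, Array.getElem?_setIfInBounds_ne (by omega), hk]; rfl
  simp only [pvBody, e1, e2, hgk, hgk1, hgset, hgset', Array.setIfInBounds_setIfInBounds]
  rfl

def pvInit (m : Nat) : Array (List Int) := ([1,1,1] :: List.replicate m [0,0,0]).toArray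

lemma pv_fold_inv (m : Nat) : ∀ k, k ≤ m →
    ((List.range k).foldl (fun dp (j : Nat) => pvBody dp (1 + (j:Int))) (pvInit m)).size = m + 1 ∧
    ((List.range k).foldl (fun dp (j : Nat) => pvBody dp (1 + (j:Int))) (pvInit m))[k]? =
      some [(pvF k).1, (pvF k).2.1, (pvF k).2.2] ∧
    ∀ j, k < j → j ≤ m →
      ((List.range k).foldl (fun dp (j : Nat) => pvBody dp (1 + (j:Int))) (pvInit m))[j]? =
        some [0,0,0] := by
  intro k
  induction k with
  | zero =>
    intro _
    refine ⟨by simp [pvInit], by simp [pvInit, pvF], ?_⟩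
    intro j hj hjm
    match j, hj with
    | j+1, _ =>
      simp [pvInit, List.getElem?_replicate]
      omega
  | succ k ih =>
    intro hk1
    obtain ⟨hlen, hrow, hrest⟩ := ih (by omega)
    set D := (List.range k).foldl (fun dp (j : Nat) => pvBody dp (1 + (j:Int))) (pvInit m) with hD
    have hstep : (List.range (k+1)).foldl (fun dp (j : Nat) => pvBody dp (1 + (j:Int))) (pvInit m) =
        pvBody D (1 + (k:Int)) := by
      rw [List.range_succ, List.foldl_append, List.foldl_cons, List.foldl_nil]
    have hbody := pv_body_eq D k (pvF k).1 (pvF k).2.1 (pvF k).2.2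
      (by omega) (by simpa using hrow) (hrest (k+1) (by omega) (by omega))
    rw [hstep, hbody]
    refine ⟨by simp [hlen], ?_, ?_⟩
    · rw [Array.getElem?_setIfInBounds_self, if_pos (by omega)]
      simp [pvF]
    · intro j hj hjm
      rw [Array.getElem?_setIfInBounds_ne (by omega)]
      exact hrest j (by omega) hjm

lemma pv_unfold (n : Int) : min_way n =
    (let dp0 := ((PySem.List.pyRange 0 n 1).map (fun _ => ([0,0,0] : List Int))).toArray
     let dp1 := dp0.setIfInBounds (0:Int).toNat (PySem.List.pySetD (dp0.getD (0:Int).toNat []) 0 1)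
     let dp2 := dp1.setIfInBounds (0:Int).toNat (PySem.List.pySetD (dp1.getD (0:Int).toNat []) 1 1)
     let dp3 := dp2.setIfInBounds (0:Int).toNat (PySem.List.pySetD (dp2.getD (0:Int).toNat []) 2 1)
     let dp := (PySem.List.pyRange 1 n 1).foldl pvBody dp3
     (PySem.List.pyGetD (dp.getD (n-1).toNat []) 0 0
      + PySem.List.pyGetD (dp.getD (n-1).toNat []) 1 0
      + PySem.List.pyGetD (dp.getD (n-1).toNat []) 2 0) % 9901) := rfl

lemma pv_A (m : Nat) :
    min_way ((m:Int)+1) = ((pvF m).1 + (pvF m).2.1 + (pvF m).2.2) % 9901 := by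
  obtain ⟨hlen, hrow, _⟩ := pv_fold_inv m m le_rfl
  rw [pv_unfold]
  have h0 : ((PySem.List.pyRange 0 ((m:Int)+1) 1).map (fun _ => ([0,0,0] : List Int))).toArray =
      (List.replicate (m+1) ([0,0,0] : List Int)).toArray := by
    rw [PySem.List.pyRange_one]
    have ht : (((m:Int)+1) - 0).toNat = m + 1 := by omega
    rw [ht, List.map_map]
    congr 1
    simp [List.eq_replicate_iff]
  have hz : (0:Int).toNat = 0 := rfl
  have hrep : (List.replicate (m+1) ([0,0,0] : List Int)).toArray.getD 0 [] = [0,0,0] := by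
    rw [Array.getD_eq_getD_getElem?, List.getElem?_toArray, List.getElem?_replicate,
      if_pos (by omega)]
    rfl
  have hseed : (List.replicate (m+1) ([0,0,0] : List Int)).toArray.setIfInBounds 0
        (PySem.List.pySetD ((List.replicate (m+1) ([0,0,0] : List Int)).toArray.getD 0 []) 0 1)
      = (([1,0,0] : List Int) :: List.replicate m [0,0,0]).toArray := by
    rw [hrep, List.setIfInBounds_toArray]
    congr 1
  have hget1 : (([1,0,0] : List Int) :: List.replicate m [0,0,0]).toArray.getD 0 [] = [1,0,0] := by
    rw [Array.getD_eq_getD_getElem?, List.getElem?_toArray]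
    rfl
  have hseed1 : (([1,0,0] : List Int) :: List.replicate m [0,0,0]).toArray.setIfInBounds 0
        (PySem.List.pySetD ((([1,0,0] : List Int) :: List.replicate m [0,0,0]).toArray.getD 0 []) 1 1)
      = (([1,1,0] : List Int) :: List.replicate m [0,0,0]).toArray := by
    rw [hget1, List.setIfInBounds_toArray]
    congr 1
  have hget2 : (([1,1,0] : List Int) :: List.replicate m [0,0,0]).toArray.getD 0 [] = [1,1,0] := by
    rw [Array.getD_eq_getD_getElem?, List.getElem?_toArray]
    rfl
  have hseed2 : (([1,1,0] : List Int) :: List.replicate m [0,0,0]).toArray.setIfInBounds 0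
        (PySem.List.pySetD ((([1,1,0] : List Int) :: List.replicate m [0,0,0]).toArray.getD 0 []) 2 1)
      = pvInit m := by
    rw [hget2, List.setIfInBounds_toArray]
    unfold pvInit
    congr 1
  have hr : PySem.List.pyRange 1 ((m:Int)+1) 1 = (List.range m).map (fun (k : Nat) => 1 + (k:Int)) := by
    rw [PySem.List.pyRange_one]
    have ht : (((m:Int)+1) - 1).toNat = m := by omega
    rw [ht]
  have hm1 : (((m:Int)+1) - 1).toNat = m := by omega
  simp only [h0, hz, hseed, hseed1, hseed2, hr, List.foldl_map, hm1]
  have hD : ((List.range m).foldl (fun dp (j : Nat) => pvBody dp (1 + (j:Int))) (pvInit m)).getD m []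
      = [(pvF m).1, (pvF m).2.1, (pvF m).2.2] := by
    rw [Array.getD_eq_getD_getElem?, hrow]
    rfl
  rw [hD]
  simp [PySem.List.pyGetD_ofNat']

lemma pv_B (m : Nat) :
    min_way_alt ((m:Int)+1) = ((pvF m).1 + (pvF m).2.1 + (pvF m).2.2) % 9901 := by
  simp only [min_way_alt]
  have ht : (((m:Int)+1) - 1).toNat = m := by omega
  rw [ht]
  exact (pv_key m).symm

-- ===== VERDICT (by name: the statement is the Claim_ definition above) =====
theorem min_way_spec : Claim_equal_min_way := by
  intro n _ hpre
  unfold Spec_min_way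
  have hn : n = (((n-1).toNat : Nat) : Int) + 1 := by
    unfold Pre_min_way at hpre
    omega
  rw [hn, pv_A, pv_B]
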